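-- pv_equiv track=rewrite | github.com/michael-horansky/coherent-states | bose-hubbard/aguiar_states_unnormalized.py | bitfield_to_composition
-- ===== SOURCE A (Python) =====
-- def bitfield_to_composition(bf):
--     res = []
--     cur_sum = 1
--     for i in range(len(bf)):
--         if bf[i] == 1:
--             cur_sum += 1
--         else:
--             res.append(cur_sum)
--             cur_sum = 1
--     #if cur_sum > 1:
--     res.append(cur_sum)
--     return(res)
-- ===== SOURCE B (Python) =====
-- def bitfield_to_composition(bf):
--     boundaries = [i for i, x in enumerate(bf) if x != 1]
--     res = []
--     prev = -1
--     for z in boundaries: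
--         res.append(z - prev)
--         prev = z
--     res.append(len(bf) - prev)
--     return res
-- ===== Notes on version B (the rewrite author's own statement) =====
-- stated objective: alternative
-- what changed: B first collects the indices of non-1 entries (run boundaries) and then produces the composition by differencing consecutive boundary indices against a running 'prev', instead of A's element-by-element counter accumulation.
import Mathlib
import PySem

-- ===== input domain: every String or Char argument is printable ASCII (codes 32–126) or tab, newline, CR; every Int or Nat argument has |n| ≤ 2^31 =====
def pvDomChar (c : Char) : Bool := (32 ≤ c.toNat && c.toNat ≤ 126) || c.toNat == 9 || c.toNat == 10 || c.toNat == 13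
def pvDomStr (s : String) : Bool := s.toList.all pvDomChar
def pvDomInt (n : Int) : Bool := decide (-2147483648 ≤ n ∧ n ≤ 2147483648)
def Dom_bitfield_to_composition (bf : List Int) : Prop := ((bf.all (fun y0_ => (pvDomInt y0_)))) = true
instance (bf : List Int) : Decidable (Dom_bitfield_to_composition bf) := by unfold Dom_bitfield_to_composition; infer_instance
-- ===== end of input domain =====

-- B collects boundary indices first and differences them; same O(n) cost as A, different decomposition.

-- ===== PORT A =====
-- A: one pass with a counter, appending the counter at each non-1 element, then appending the final counter.
def bitfield_to_composition (bf : List Int) : List Int :=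
  let st := bf.foldl (fun (p : List Int × Int) x =>
    if x = 1 then (p.1, p.2 + 1) else (p.1 ++ [p.2], 1)) ([], 1)
  st.1 ++ [st.2]

-- ===== PORT B =====
-- B: boundary indices of non-1 entries, then gap differencing against a running prev.
def bitfield_to_composition_alt (bf : List Int) : List Int :=
  let boundaries := ((PySem.List.enumerate bf 0).filter (fun p => p.2 ≠ 1)).map (fun p => p.1)
  let st := boundaries.foldl (fun (p : List Int × Int) z => (p.1 ++ [z - p.2], z)) ([], -1)
  st.1 ++ [(bf.length : Int) - st.2]

-- ===== PRECONDITION & SPEC =====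
def Spec_bitfield_to_composition (bf : List Int) (out : List Int) : Prop := out = bitfield_to_composition_alt bf
instance (bf : List Int) (out : List Int) : Decidable (Spec_bitfield_to_composition bf out) := by unfold Spec_bitfield_to_composition; infer_instance

-- ===== CLAIM (what is proved, stated in full; the proofs are below) =====
def Claim_equal_bitfield_to_composition : Prop := ∀ (bf : List Int), Dom_bitfield_to_composition bf → Spec_bitfield_to_composition bf (bitfield_to_composition bf)

-- ===== LEMMAS AND PROOFS =====

-- Generalized invariant: starting enumeration at index n with B-state (acc, prev) matches
-- the A-fold starting from (acc, n - prev), since A's counter always equals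
-- (elements consumed so far) - (index of last boundary, or -1).
theorem pv_main (bf : List Int) : ∀ (n : Int) (acc : List Int) (prev : Int),
    (let boundaries := ((PySem.List.enumerate bf n).filter (fun p => p.2 ≠ 1)).map (fun p => p.1)
     let st := boundaries.foldl (fun (p : List Int × Int) z => (p.1 ++ [z - p.2], z)) (acc, prev)
     st.1 ++ [(n + (bf.length : Int)) - st.2])
  = (let st := bf.foldl (fun (p : List Int × Int) x =>
       if x = 1 then (p.1, p.2 + 1) else (p.1 ++ [p.2], 1)) (acc, n - prev)
     st.1 ++ [st.2]) := by
  induction bf with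
  | nil => intro n acc prev; simp [PySem.List.enumerate]
  | cons x xs ih =>
    intro n acc prev
    simp only [PySem.List.enumerate_cons]
    by_cases hx : x = 1
    · have h := ih (n + 1) acc prev
      simp only [hx, List.filter_cons, List.foldl_cons]
      simp only [ne_eq, not_true_eq_false, decide_false] at h ⊢
      simp only [List.length_cons] at *
      have : n + 1 + (xs.length : Int) = n + ((xs.length : Int) + 1) := by ring
      rw [this] at h
      have : n + 1 - prev = n - prev + 1 := by ring
      rw [this] at h
      exact h
    · have h := ih (n + 1) (acc ++ [n - prev]) n
      simp only [List.filter_cons, List.foldl_cons, if_neg hx]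
      simp only [ne_eq, hx, not_false_eq_true, decide_true]
      simp only [List.length_cons] at *
      have e1 : n + 1 + (xs.length : Int) = n + ((xs.length : Int) + 1) := by ring
      rw [e1] at h
      have e2 : n + 1 - n = (1 : Int) := by ring
      rw [e2] at h
      exact h

-- ===== VERDICT (by name: the statement is the Claim_ definition above) =====
theorem bitfield_to_composition_spec : Claim_equal_bitfield_to_composition := by
  intro bf _
  unfold Spec_bitfield_to_composition bitfield_to_composition bitfield_to_composition_alt
  have h := pv_main bf 0 [] (-1)
  simp only [zero_add, zero_sub, neg_neg] at h
  exact h.symm
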